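-- pv_equiv track=rewrite | github.com/ProjetMondrian/Interface | Mondrian.py | getFirstY
-- ===== SOURCE A (Python) =====
-- def getFirstY(direction,matrix,value,line):
--     numcols = len(matrix[0])
--     if value < numcols and value > 0:
--         if direction == "right" :
--             if matrix[line][value] == 0 :
--                 value = getFirstY("right",matrix,value + 1,line)
--             return value
--         if direction == "left" :
--             if matrix[line][value] == 0 :
--                 value = getFirstY("left",matrix,value - 1,line)
--             return value
--     else :
--         return value
-- ===== SOURCE B (Python) =====
-- def getFirstY(direction, matrix, value, line):
--     numcols = len(matrix[0])
--     if not (0 < value < numcols):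
--         return value
--     if direction == "right":
--         step = 1
--     elif direction == "left":
--         step = -1
--     else:
--         return None
--     while 0 < value < numcols and matrix[line][value] == 0:
--         value += step
--     return value
-- ===== Notes on version B (the rewrite author's own statement) =====
-- stated objective: simpler
-- what changed: A's per-direction recursion is replaced by an out-of-range guard, a step computed from the direction, and a single iterative while-loop scan.
-- outside the precondition, e.g. on getFirstY('up', [[0, 1]], 1, 0): A returns None, B returns None; on getFirstY('right', [[0, 1, 9], [5, 5]], 1, 1): A returns 1, B returns 1
import Mathlib
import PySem

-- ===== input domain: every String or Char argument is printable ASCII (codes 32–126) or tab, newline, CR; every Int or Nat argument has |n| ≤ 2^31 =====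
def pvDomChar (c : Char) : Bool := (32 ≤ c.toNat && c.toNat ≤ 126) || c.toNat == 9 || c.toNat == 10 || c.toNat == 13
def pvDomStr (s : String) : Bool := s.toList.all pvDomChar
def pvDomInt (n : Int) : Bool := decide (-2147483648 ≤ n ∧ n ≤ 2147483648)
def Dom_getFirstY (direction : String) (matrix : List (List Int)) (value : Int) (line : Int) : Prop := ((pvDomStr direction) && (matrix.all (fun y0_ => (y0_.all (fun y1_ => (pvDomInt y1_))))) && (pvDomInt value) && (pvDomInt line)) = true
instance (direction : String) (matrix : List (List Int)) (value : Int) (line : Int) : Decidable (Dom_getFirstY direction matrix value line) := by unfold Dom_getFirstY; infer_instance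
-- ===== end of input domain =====

-- B replaces A's per-direction recursion by a single iterative scan loop with a step; return values only (no mutation); objective: simpler.

-- ===== PORT A =====
-- literal transliteration of A's recursion; matrix[0] and matrix[line][value] are ported
-- with pyGet? (the .getD defaults are only reachable outside Pre_, where Python raises)
def getFirstY (direction : String) (matrix : List (List Int)) (value : Int) (line : Int) : Int :=
  if value < ((matrix.headD []).length : Int) ∧ 0 < value then
    if direction = "right" then
      if (PySem.List.pyGet? ((PySem.List.pyGet? matrix line).getD []) value).getD 1 = 0 then
        getFirstY "right" matrix (value + 1) line
      else value
    else if direction = "left" then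
      if (PySem.List.pyGet? ((PySem.List.pyGet? matrix line).getD []) value).getD 1 = 0 then
        getFirstY "left" matrix (value - 1) line
      else value
    else 0   -- Python returns None here; excluded by Pre_
  else value
termination_by if direction = "right" then (((matrix.headD []).length : Int) - value).toNat else value.toNat
decreasing_by
  all_goals simp_all

-- ===== PORT B =====
-- the while loop of Source B: advance while in range and the cell is zero
def scanY (matrix : List (List Int)) (line : Int) (numcols : Int) (right : Bool) (value : Int) : Int :=
  if 0 < value ∧ value < numcols ∧ (PySem.List.pyGet? ((PySem.List.pyGet? matrix line).getD []) value).getD 1 = 0 then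
    scanY matrix line numcols right (if right then value + 1 else value - 1)
  else value
termination_by if right then (numcols - value).toNat else value.toNat
decreasing_by
  all_goals cases right <;> simp_all

def getFirstY_alt (direction : String) (matrix : List (List Int)) (value : Int) (line : Int) : Int :=
  let numcols : Int := ((matrix.headD []).length : Int)
  if ¬ (0 < value ∧ value < numcols) then value
  else if direction = "right" then scanY matrix line numcols true value
  else if direction = "left" then scanY matrix line numcols false value
  else 0   -- Source B returns None here; excluded by Pre_

-- ===== PRECONDITION & SPEC =====
-- Pre_ excludes inputs where the Python A raises (empty matrix; out-of-range line; a row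
-- shorter than numcols that the scan may run off) or returns None (value in range with an
-- unknown direction, not an Int). The row-length bound is slightly conservative: on a
-- short row where the scan happens to stop early A still returns (see claim cites).
def Pre_getFirstY (direction : String) (matrix : List (List Int)) (value : Int) (line : Int) : Prop :=
  matrix ≠ [] ∧
  ((0 < value ∧ value < ((matrix.headD []).length : Int)) →
    ((direction = "right" ∨ direction = "left") ∧
     PySem.Raise.InRange matrix.length line ∧
     (matrix.headD []).length ≤ ((PySem.List.pyGet? matrix line).getD []).length))
instance (direction : String) (matrix : List (List Int)) (value : Int) (line : Int) : Decidable (Pre_getFirstY direction matrix value line) := by unfold Pre_getFirstY; infer_instance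

def pvWitness_getFirstY : String × List (List Int) × Int × Int := ("right", [[0, 0, 3]], 1, 0)

def Spec_getFirstY (direction : String) (matrix : List (List Int)) (value : Int) (line : Int) (out : Int) : Prop := out = getFirstY_alt direction matrix value line
instance (direction : String) (matrix : List (List Int)) (value : Int) (line : Int) (out : Int) : Decidable (Spec_getFirstY direction matrix value line out) := by unfold Spec_getFirstY; infer_instance

-- ===== CLAIM (what is proved, stated in full; the proofs are below) =====
def Claim_equal_getFirstY : Prop := ∀ (direction : String) (matrix : List (List Int)) (value : Int) (line : Int), Dom_getFirstY direction matrix value line → Pre_getFirstY direction matrix value line → Spec_getFirstY direction matrix value line (getFirstY direction matrix value line)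

-- ===== LEMMAS AND PROOFS =====
theorem scan_eq (direction : String) (matrix : List (List Int)) (value line : Int)
    (hd : direction = "right" ∨ direction = "left") :
    getFirstY direction matrix value line
      = scanY matrix line ((matrix.headD []).length : Int) (direction == "right") value := by
  fun_induction getFirstY direction matrix value line with
  | case1 h hc ih => rw [scanY]; simp_all
  | case2 h hc => rw [scanY]; simp_all
  | case3 h hc ih => rw [scanY]; simp_all
  | case4 h hc => rw [scanY]; simp_all
  | case5 h h1 h2 => simp_all
  | case6 h => rw [scanY]; simp_all; omega

-- ===== VERDICT (by name: the statement is the Claim_ definition above) =====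
theorem getFirstY_spec : Claim_equal_getFirstY := by
  intro direction matrix value line _ _
  unfold Spec_getFirstY getFirstY_alt
  by_cases hr : 0 < value ∧ value < ((matrix.headD []).length : Int)
  · by_cases hd : direction = "right"
    · rw [scan_eq direction matrix value line (Or.inl hd)]
      simp only [List.headD_eq_head?_getD] at hr
      simp [hr, hd]
    · by_cases hl : direction = "left"
      · rw [scan_eq direction matrix value line (Or.inr hl)]
        simp only [List.headD_eq_head?_getD] at hr
        simp [hr, hl]
      · rw [getFirstY]; simp_all
  · rw [getFirstY]
    simp only [List.headD_eq_head?_getD] at *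
    simp_all; omega
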